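/- GENERATED by farm/mkstatement.py from design/units.tsv (unit `start_page`) and the Specs of Vorbis/Spec/*.lean — do not edit.
   THE STATEMENT of the proof unit `start_page`: the function `start_page` (13 instructions) satisfies its contract,
   given the contracts of its callees. What the names mean: Vorbis/Spec/Basic.lean. The theorem to prove:
   `theorem start_page_ok : Vorbis.Spec.start_page.Statement`. -/
import Vorbis.Spec.Leaves
import Vorbis.Spec.Reader
namespace Vorbis.Spec.start_page
open X86 X86.User Asan

/-- The statement of unit `start_page`. -/
def Statement : Prop :=
  ∀ (Lay : Layout) (_hLay : Lay.hi = 0x1000000) (μ : Microarch) (_hμ : UserX.MicroOK μ) (u₀ : State)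
    (_hcode : HasCodeNat Lay u₀ Vorbis.L.start_page.entry Vorbis.Code.code_start_page.nat Vorbis.L.start_page.size)
    (_h_capture_pattern : ∀ (others : List Obj) (frames : List (Nat × FrameLayout)) (Blk : Block → Prop) (len : Nat), Calls Lay μ Vorbis.WayInv (Vorbis.conv u₀) Vorbis.L.capture_pattern.entry (Vorbis.Spec.capture_pattern.spec others frames Blk len))
    (_h_start_page_no_capturepattern : ∀ (others : List Obj) (frames : List (Nat × FrameLayout)) (Blk : Block → Prop) (len : Nat), Calls Lay μ Vorbis.WayInv (Vorbis.conv u₀) Vorbis.L.start_page_no_capturepattern.entry (Vorbis.Spec.start_page_no_capturepattern.spec others frames Blk len))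
    (_h_error : ∀ (others : List Obj) (frames : List (Nat × FrameLayout)), Calls Lay μ Vorbis.WayInv (Vorbis.conv u₀) Vorbis.L.error.entry (Vorbis.Spec.error.spec others frames)),
    ∀ (others : List Obj) (frames : List (Nat × FrameLayout)) (Blk : Block → Prop) (len : Nat), Calls Lay μ Vorbis.WayInv (Vorbis.conv u₀) Vorbis.L.start_page.entry (Vorbis.Spec.start_page.spec others frames Blk len)

end Vorbis.Spec.start_page
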